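-- pv_equiv track=rewrite | github.com/YacineCC/UNI | L2/I33/test.py | somme
-- ===== SOURCE A (Python) =====
-- def somme(L,M):
--     tab = []
--     a = L[1]
--     b = M[1]
--     if a > b:
--         for i in range(1,b):
--             if a % i == 0:
--                 tab += [i]
--     else:
--         for i in range(1,a):
--             if b % i == 0:
--                 tab += [i]
--     return tab
-- ===== SOURCE B (Python) =====
-- def somme(L, M):
--     a = L[1]
--     b = M[1]
--     n, bound = (a, b) if a > b else (b, a)
--     if bound < 2:
--         return []
--     divs = set()
--     i = 1
--     while i * i <= n:
--         if n % i == 0: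
--             divs.add(i)
--             divs.add(n // i)
--         i += 1
--     return sorted(d for d in divs if d < bound)
-- ===== Notes on version B (the rewrite author's own statement) =====
-- stated objective: faster
-- what changed: B replaces A's linear scan of range(1, min_value) with sqrt-bounded divisor-pair enumeration of the larger value into a set, then filters by the bound and sorts ascending.
import Mathlib
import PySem

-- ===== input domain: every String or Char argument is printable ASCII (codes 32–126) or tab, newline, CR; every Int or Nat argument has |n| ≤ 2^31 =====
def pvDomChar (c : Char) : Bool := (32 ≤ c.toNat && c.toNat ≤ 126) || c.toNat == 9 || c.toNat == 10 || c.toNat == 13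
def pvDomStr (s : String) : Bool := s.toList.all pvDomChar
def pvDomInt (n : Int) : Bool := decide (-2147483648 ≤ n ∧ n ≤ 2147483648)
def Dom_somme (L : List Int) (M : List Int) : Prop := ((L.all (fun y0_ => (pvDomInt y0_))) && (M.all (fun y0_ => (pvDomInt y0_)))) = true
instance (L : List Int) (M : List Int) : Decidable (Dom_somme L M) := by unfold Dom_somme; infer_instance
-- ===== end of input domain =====

-- B enumerates divisors of the larger second element up to its square root (collecting both i and n//i),
-- then filters below the smaller second element and sorts ascending, instead of A's linear scan of the range.

-- ===== PORT A =====
def somme (L : List Int) (M : List Int) : List Int :=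
  let a := (PySem.List.pyGet? L 1).getD 0   -- L[1]; Pre_ guarantees the index is in range
  let b := (PySem.List.pyGet? M 1).getD 0   -- M[1]
  if a > b then
    (PySem.List.pyRange 1 b 1).foldl
      (fun tab i => if PySem.Int.mod a i == 0 then tab ++ [i] else tab) []
  else
    (PySem.List.pyRange 1 a 1).foldl
      (fun tab i => if PySem.Int.mod b i == 0 then tab ++ [i] else tab) []

-- ===== PORT B =====
-- the 'while i*i <= n' loop of Source B; fuel bounds the iteration count (n.toNat suffices, see somme_alt)
def pvCollectDivs (n : Int) (i : Int) (fuel : Nat) (acc : PySem.Set Int) : PySem.Set Int :=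
  match fuel with
  | 0 => acc
  | Nat.succ f =>
      if i * i ≤ n then
        pvCollectDivs n (i + 1) f
          (if PySem.Int.mod n i == 0 then
             PySem.Set.add (PySem.Set.add acc i) (PySem.Int.floordiv n i)
           else acc)
      else acc

def somme_alt (L : List Int) (M : List Int) : List Int :=
  let a := (PySem.List.pyGet? L 1).getD 0
  let b := (PySem.List.pyGet? M 1).getD 0
  let nb := if a > b then (a, b) else (b, a)
  let n := nb.1
  let bound := nb.2
  if bound < 2 then []
  else
    let divs := pvCollectDivs n 1 n.toNat PySem.Set.empty
    PySem.List.sorted (divs.filter (fun d => decide (d < bound))) (fun x => x) false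

-- ===== PRECONDITION & SPEC =====
-- Pre_ excludes exactly the inputs where A raises IndexError: a list shorter than 2 has no element [1].
def Pre_somme (L : List Int) (M : List Int) : Prop := 2 ≤ L.length ∧ 2 ≤ M.length
instance (L : List Int) (M : List Int) : Decidable (Pre_somme L M) := by unfold Pre_somme; infer_instance
def pvWitness_somme : List Int × List Int := ([0, 12], [0, 7])
def Spec_somme (L : List Int) (M : List Int) (out : List Int) : Prop := out = somme_alt L M
instance (L : List Int) (M : List Int) (out : List Int) : Decidable (Spec_somme L M out) := by unfold Spec_somme; infer_instance

-- ===== CLAIM (what is proved, stated in full; the proofs are below) =====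
def Claim_equal_somme : Prop := ∀ (L : List Int) (M : List Int), Dom_somme L M → Pre_somme L M → Spec_somme L M (somme L M)

-- ===== LEMMAS AND PROOFS =====

theorem pvCollectDivs_nodup (n i : Int) (fuel : Nat) (acc : PySem.Set Int)
    (h : acc.Nodup) : (pvCollectDivs n i fuel acc).Nodup := by
  induction fuel generalizing i acc with
  | zero => simpa [pvCollectDivs] using h
  | succ f ih =>
      simp only [pvCollectDivs]
      split
      · apply ih
        split
        · exact PySem.Set.nodup_add _ _ (PySem.Set.nodup_add _ _ h)
        · exact h
      · exact h

theorem pvCollectDivs_mem (n : Int) (fuel : Nat) (i : Int) (acc : PySem.Set Int)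
    (hi : 1 <= i) (hf : n < (i + fuel) * (i + fuel)) (x : Int) :
    x ∈ pvCollectDivs n i fuel acc ↔
      x ∈ acc ∨ ∃ j, i ≤ j ∧ j * j ≤ n ∧ PySem.Int.mod n j = 0 ∧
        (x = j ∨ x = PySem.Int.floordiv n j) := by
  induction fuel generalizing i acc with
  | zero =>
      simp only [pvCollectDivs]
      constructor
      · exact fun h => Or.inl h
      · rintro (h | ⟨j, hij, hjj, -, -⟩)
        · exact h
        · exfalso
          have hii : i * i ≤ j * j := mul_le_mul hij hij (by omega) (by omega)
          have : (i + (0:Nat)) * (i + (0:Nat)) = i * i := by push_cast; ring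
          omega
  | succ f ih =>
      simp only [pvCollectDivs]
      split
      · rename_i hle
        have hf' : n < (i + 1 + (f:Int)) * (i + 1 + (f:Int)) := by push_cast at hf ⊢; linarith
        rw [ih (i + 1) _ (by omega) hf' ]
        by_cases hmod : PySem.Int.mod n i = 0
        · simp only [hmod, beq_self_eq_true, if_true, PySem.Set.mem_add]
          constructor
          · rintro ((( hacc | hxi) | hxd) | ⟨j, hij, hjj, hm, hx⟩)
            · exact Or.inl hacc
            · exact Or.inr ⟨i, le_refl i, hle, hmod, Or.inl hxi⟩
            · exact Or.inr ⟨i, le_refl i, hle, hmod, Or.inr hxd⟩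
            · exact Or.inr ⟨j, by omega, hjj, hm, hx⟩
          · rintro (hacc | ⟨j, hij, hjj, hm, hx⟩)
            · exact Or.inl (Or.inl (Or.inl hacc))
            · rcases eq_or_lt_of_le hij with heq | hlt
              · subst heq
                rcases hx with hx | hx
                · exact Or.inl (Or.inl (Or.inr hx))
                · exact Or.inl (Or.inr hx)
              · exact Or.inr ⟨j, by omega, hjj, hm, hx⟩
        · have hbeq : (PySem.Int.mod n i == 0) = false := by
            simpa using hmod
          simp only [hbeq]
          constructor
          · rintro (hacc | ⟨j, hij, hjj, hm, hx⟩)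
            · exact Or.inl hacc
            · exact Or.inr ⟨j, by omega, hjj, hm, hx⟩
          · rintro (hacc | ⟨j, hij, hjj, hm, hx⟩)
            · exact Or.inl hacc
            · rcases eq_or_lt_of_le hij with heq | hlt
              · exact absurd (heq ▸ hm) hmod
              · exact Or.inr ⟨j, by omega, hjj, hm, hx⟩
      · rename_i hgt
        constructor
        · exact fun h => Or.inl h
        · rintro (h | ⟨j, hij, hjj, -, -⟩)
          · exact h
          · exfalso
            have : i * i ≤ j * j := mul_le_mul hij hij (by omega) (by omega)
            omega

-- the pairs (j, n // j) with j ≤ sqrt(n) cover exactly the positive divisors of n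
theorem pvDiv_char (n x : Int) (hn : 0 < n) :
    (∃ j, 1 ≤ j ∧ j * j ≤ n ∧ PySem.Int.mod n j = 0 ∧
      (x = j ∨ x = PySem.Int.floordiv n j)) ↔ (1 ≤ x ∧ x ∣ n) := by
  constructor
  · rintro ⟨j, h1j, hjj, hm, hx⟩
    have hdvd : j ∣ n := (PySem.Int.mod_eq_zero_iff_dvd n j).mp hm
    obtain ⟨c, hc⟩ := hdvd
    have hc1 : 1 ≤ c := by nlinarith
    rcases hx with hx | hx
    · exact hx ▸ ⟨h1j, ⟨c, hc⟩⟩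
    · have hfd : PySem.Int.floordiv n j = c := by
        rw [PySem.Int.floordiv_eq_ediv_of_pos (by omega), hc,
          Int.mul_ediv_cancel_left _ (by omega)]
      refine hx ▸ hfd ▸ ⟨hc1, ⟨j, by rw [hc]; ring⟩⟩
  · rintro ⟨h1x, c, hc⟩
    have hc1 : 1 ≤ c := by nlinarith
    by_cases hxx : x * x ≤ n
    · exact ⟨x, h1x, hxx, (PySem.Int.mod_eq_zero_iff_dvd n x).mpr ⟨c, hc⟩, Or.inl rfl⟩
    · refine ⟨c, hc1, by nlinarith, (PySem.Int.mod_eq_zero_iff_dvd n c).mpr ⟨x, by rw [hc]; ring⟩, Or.inr ?_⟩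
      rw [PySem.Int.floordiv_eq_ediv_of_pos (by omega), hc,
        mul_comm, Int.mul_ediv_cancel_left _ (by omega)]

-- the shared core: A's range scan of divisors of n below bound equals B's sqrt enumeration + filter + sort
theorem pvCore (n bound : Int) (hnb : bound ≤ n) :
    (PySem.List.pyRange 1 bound 1).foldl
      (fun tab i => if PySem.Int.mod n i == 0 then tab ++ [i] else tab) [] =
    (if bound < 2 then [] else
      PySem.List.sorted
        ((pvCollectDivs n 1 n.toNat PySem.Set.empty).filter (fun d => decide (d < bound)))
        (fun x => x) false) := by
  by_cases hb : bound < 2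
  · rw [if_pos hb, PySem.List.pyRange_one_eq_nil (by omega)]
    rfl
  · rw [if_neg hb]
    rw [not_lt] at hb
    have hn : 2 ≤ n := le_trans hb hnb
    have hmemS : ∀ x, x ∈ pvCollectDivs n 1 n.toNat PySem.Set.empty ↔ (1 ≤ x ∧ x ∣ n) := by
      intro x
      rw [pvCollectDivs_mem n n.toNat 1 PySem.Set.empty (le_refl 1)
        (by have : ((n.toNat : Int)) = n := Int.toNat_of_nonneg (by omega)
            rw [this]; nlinarith)]
      simp only [PySem.Set.empty, List.not_mem_nil, false_or]
      exact pvDiv_char n x (by omega)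
    have hfold :
        (PySem.List.pyRange 1 bound 1).foldl
          (fun tab i => if PySem.Int.mod n i == 0 then tab ++ [i] else tab) [] =
        (PySem.List.pyRange 1 bound 1).filter (fun i => PySem.Int.mod n i == 0) := by
      simpa using PySem.List.foldl_append_if_eq_filter
        (l := PySem.List.pyRange 1 bound 1) (p := fun i => PySem.Int.mod n i == 0) (acc := [])
    rw [hfold]
    symm
    apply PySem.List.sorted_eq_of_perm_of_pairwise_lt
    · rw [List.perm_ext_iff_of_nodup
        ((PySem.List.nodup_pyRange_one 1 bound).filter _)
        ((pvCollectDivs_nodup n 1 n.toNat PySem.Set.empty List.nodup_nil).filter _)]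
      intro x
      simp only [List.mem_filter, PySem.List.mem_pyRange_one, hmemS x,
        decide_eq_true_eq, beq_iff_eq, PySem.Int.mod_eq_zero_iff_dvd]
      constructor
      · rintro ⟨⟨h1, h2⟩, h3⟩; exact ⟨⟨h1, h3⟩, h2⟩
      · rintro ⟨⟨h1, h3⟩, h2⟩; exact ⟨⟨h1, h2⟩, h3⟩
    · exact List.Pairwise.filter _ (PySem.List.pairwise_lt_pyRange_one 1 bound)

-- ===== VERDICT (by name: the statement is the Claim_ definition above) =====
theorem somme_spec : Claim_equal_somme := by
  intro L M _ _
  show somme L M = somme_alt L M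
  unfold somme somme_alt
  by_cases hab : (PySem.List.pyGet? L 1).getD 0 > (PySem.List.pyGet? M 1).getD 0
  · simp only [if_pos hab]
    exact pvCore _ _ (le_of_lt hab)
  · simp only [if_neg hab]
    exact pvCore _ _ (by omega)
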